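-- pv_equiv track=rewrite | github.com/Beliavsky/PyC2F | util.py | remove_newlines_in_quotes
-- ===== SOURCE A (Python) =====
-- def remove_newlines_in_quotes(text):
--     """Remove literal '\n' sequences within single- or
--     double-quoted text in a string, preserving '\n' outside quotes."""
--     result = []
--     i = 0
--     in_quote = False
--     quote_char = None
--
--     while i < len(text):
--         if text[i] in ('"', "'") and (i == 0 or text[i-1] != '\\'):
--             # Toggle quote state
--             if in_quote and text[i] == quote_char:
--                 in_quote = False
--                 quote_char = None
--             elif not in_quote:
--                 in_quote = True
--                 quote_char = text[i]
--             result.append(text[i])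
--             i += 1
--         elif in_quote and text[i] == '\\' and i + 1 < len(text) and text[i + 1] == 'n':
--             # Skip \n inside quotes
--             i += 2
--         else:
--             # Copy character as is
--             result.append(text[i])
--             i += 1
--     return ''.join(result)
-- ===== SOURCE B (Python) =====
-- def remove_newlines_in_quotes(text):
--     """Remove literal '\n' sequences within single- or
--     double-quoted text in a string, preserving '\n' outside quotes."""
--     # Phase 1: split text into (segment, in_quote) pieces at unescaped quote
--     # toggles; phase 2: strip '\n' from quoted pieces and rejoin.
--     segments = []
--     start = 0
--     in_quote = False
--     quote_char = None
--     for i, ch in enumerate(text):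
--         if ch in ('"', "'") and (i == 0 or text[i-1] != '\\'):
--             if in_quote and ch == quote_char:
--                 segments.append((text[start:i+1], True))
--                 start = i + 1
--                 in_quote = False
--                 quote_char = None
--             elif not in_quote:
--                 segments.append((text[start:i], False))
--                 start = i
--                 in_quote = True
--                 quote_char = ch
--     segments.append((text[start:], in_quote))
--     return ''.join(seg.replace('\\n', '') if q else seg for seg, q in segments)
-- ===== Notes on version B (the rewrite author's own statement) =====
-- stated objective: alternative
-- what changed: Replaces A's single interleaved per-character scan that skips backslash-n pairs while toggling quote state with a two-phase decomposition: first segment the text at unescaped quote toggles into (substring, in_quote) pieces, then strip the backslash-n pattern from quoted pieces with str.replace and rejoin.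
import Mathlib
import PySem

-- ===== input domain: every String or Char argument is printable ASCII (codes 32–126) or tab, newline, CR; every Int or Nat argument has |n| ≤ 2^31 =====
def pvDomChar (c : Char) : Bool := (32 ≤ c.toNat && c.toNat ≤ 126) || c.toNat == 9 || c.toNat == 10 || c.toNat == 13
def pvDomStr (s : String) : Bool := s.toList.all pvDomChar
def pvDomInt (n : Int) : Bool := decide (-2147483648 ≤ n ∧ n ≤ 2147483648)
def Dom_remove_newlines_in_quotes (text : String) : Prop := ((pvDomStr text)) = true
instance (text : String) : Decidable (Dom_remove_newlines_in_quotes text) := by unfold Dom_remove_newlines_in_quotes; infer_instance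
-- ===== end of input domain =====

-- B replaces A's interleaved skip-while-scanning with a two-phase decomposition
-- (segment the text at unescaped quote toggles, then strip '\'+'n' from quoted segments and rejoin); objective: alternative.

-- ===== PORT A =====
-- A's while loop over the index i with state (in_quote, quote_char, result).
def rnqLoopA (cs : List Char) (i : Nat) (inq : Bool) (qc : Option Char)
    (result : List Char) : List Char :=
  if h : i < cs.length then
    if (cs[i] = '"' ∨ cs[i] = '\'') ∧ (i = 0 ∨ cs[i-1]? ≠ some '\\') then
      if inq ∧ qc = some cs[i] then rnqLoopA cs (i+1) false none (result ++ [cs[i]])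
      else if ¬ inq then rnqLoopA cs (i+1) true (some cs[i]) (result ++ [cs[i]])
      else rnqLoopA cs (i+1) inq qc (result ++ [cs[i]])
    else if inq ∧ cs[i] = '\\' ∧ i+1 < cs.length ∧ cs[i+1]? = some 'n' then
      rnqLoopA cs (i+2) inq qc result
    else rnqLoopA cs (i+1) inq qc (result ++ [cs[i]])
  else result
termination_by cs.length - i

def remove_newlines_in_quotes (text : String) : String :=
  String.mk (rnqLoopA text.toList 0 false none [])

-- ===== PORT B =====
-- text[a:b] for 0 ≤ a ≤ b ≤ len (the only way Source B slices); exact there.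
def sliceN (cs : List Char) (a b : Nat) : List Char := (cs.drop a).take (b - a)

-- str.replace('\\n', ''): Python's left-to-right removal of the two-char pattern.
def removeBSn : List Char → List Char
  | '\\' :: 'n' :: rest => removeBSn rest
  | c :: rest => c :: removeBSn rest
  | [] => []

-- Phase 1: the for-loop over enumerate(text) building the (segment, in_quote) list.
def segsB (cs : List Char) (i start : Nat) (inq : Bool) (qc : Option Char) :
    List (List Char × Bool) :=
  if h : i < cs.length then
    if (cs[i] = '"' ∨ cs[i] = '\'') ∧ (i = 0 ∨ cs[i-1]? ≠ some '\\') then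
      if inq ∧ qc = some cs[i] then
        (sliceN cs start (i+1), true) :: segsB cs (i+1) (i+1) false none
      else if ¬ inq then
        (sliceN cs start i, false) :: segsB cs (i+1) i true (some cs[i])
      else segsB cs (i+1) start inq qc
    else segsB cs (i+1) start inq qc
  else [(cs.drop start, inq)]
termination_by cs.length - i

-- Phase 2: per-segment replace, then join.
def renderSeg (p : List Char × Bool) : List Char := if p.2 then removeBSn p.1 else p.1

def remove_newlines_in_quotes_alt (text : String) : String :=
  String.mk (((segsB text.toList 0 0 false none).map renderSeg).flatten)

-- ===== PRECONDITION & SPEC =====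
def Spec_remove_newlines_in_quotes (text : String) (out : String) : Prop := out = remove_newlines_in_quotes_alt text
instance (text : String) (out : String) : Decidable (Spec_remove_newlines_in_quotes text out) := by unfold Spec_remove_newlines_in_quotes; infer_instance

-- ===== CLAIM (what is proved, stated in full; the proofs are below) =====
def Claim_equal_remove_newlines_in_quotes : Prop := ∀ (text : String), Dom_remove_newlines_in_quotes text → Spec_remove_newlines_in_quotes text (remove_newlines_in_quotes text)

-- ===== LEMMAS AND PROOFS =====

theorem sliceN_self (cs : List Char) (s : Nat) : sliceN cs s s = [] := by
  simp [sliceN]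

theorem sliceN_succ (cs : List Char) (s i : Nat) (hs : s ≤ i) (hi : i < cs.length) :
    sliceN cs s (i+1) = sliceN cs s i ++ [cs[i]] := by
  unfold sliceN
  have h1 : i + 1 - s = (i - s) + 1 := by omega
  rw [h1, List.take_succ]
  have h2 : (cs.drop s)[i-s]? = some cs[i] := by
    rw [List.getElem?_drop]
    have : s + (i - s) = i := by omega
    rw [this, List.getElem?_eq_getElem hi]
  simp [h2]

theorem sliceN_len (cs : List Char) (s : Nat) :
    sliceN cs s cs.length = cs.drop s := by
  unfold sliceN
  apply List.take_of_length_le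
  simp

theorem sliceN_getLast? (cs : List Char) (s i : Nat) (hs : s < i) (hi : i ≤ cs.length) :
    (sliceN cs s i).getLast? = cs[i-1]? := by
  have h1 : i - 1 + 1 = i := by omega
  have h2 := sliceN_succ cs s (i-1) (by omega) (by omega)
  rw [h1] at h2
  rw [h2, List.getLast?_concat, List.getElem?_eq_getElem (by omega)]

theorem removeBSn_single (c : Char) : removeBSn [c] = [c] := by
  conv_lhs => rw [removeBSn.eq_def]
  split <;> simp_all <;> rfl

theorem removeBSn_cons (c : Char) (rest : List Char)
    (h : ¬(c = '\\' ∧ rest.head? = some 'n')) :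
    removeBSn (c :: rest) = c :: removeBSn rest := by
  conv_lhs => rw [removeBSn.eq_def]
  split
  · rename_i heq
    exfalso
    injection heq with h1 h2
    exact h ⟨h1, by simp [h2]⟩
  · rename_i heq
    injection heq with h1 h2
    subst h1; subst h2; rfl
  · rename_i heq; exact absurd heq (by simp)

theorem removeBSn_append (u v : List Char)
    (h : u.getLast? = some '\\' → v.head? ≠ some 'n') :
    removeBSn (u ++ v) = removeBSn u ++ removeBSn v := by
  induction u using removeBSn.induct generalizing v with
  | case3 => simp only [List.nil_append, show removeBSn ([]:List Char) = [] from rfl]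
  | case1 rest ih =>
      show removeBSn ('\\' :: 'n' :: (rest ++ v)) = removeBSn ('\\' :: 'n' :: rest) ++ removeBSn v
      rw [show removeBSn ('\\' :: 'n' :: (rest ++ v)) = removeBSn (rest ++ v) from rfl,
          show removeBSn ('\\' :: 'n' :: rest) = removeBSn rest from rfl]
      apply ih
      intro hl
      apply h
      cases rest with
      | nil => simp at hl
      | cons a as => simpa using hl
  | case2 c rest hne ih =>
      cases rest with
      | nil =>
          show removeBSn (c :: v) = removeBSn [c] ++ removeBSn v
          rw [removeBSn_single]
          rcases v with _ | ⟨b, bs⟩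
          · rw [removeBSn_single]; rfl
          · rw [removeBSn_cons c (b :: bs) ?_]
            · rfl
            · rintro ⟨hc, hb⟩
              exact h (by simp [hc]) (by simpa using hb)
      | cons a as =>
          have hna : ¬(c = '\\' ∧ a = 'n') := fun ⟨h1, h2⟩ => hne as h1 (by rw [h2])
          rw [show (c :: a :: as) ++ v = c :: ((a :: as) ++ v) from rfl]
          rw [removeBSn_cons c ((a :: as) ++ v) (by simpa using hna),
              removeBSn_cons c (a :: as) (by simpa using hna)]
          rw [ih v (by intro hl; exact h (by simpa using hl))]
          simp

theorem rnqLoopA_acc (cs : List Char) :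
    ∀ n i inq qc res, cs.length - i ≤ n →
      rnqLoopA cs i inq qc res = res ++ rnqLoopA cs i inq qc [] := by
  intro n
  induction n with
  | zero =>
      intro i inq qc res hn
      have h : ¬ i < cs.length := by omega
      conv_lhs => rw [rnqLoopA.eq_def]
      conv_rhs => rw [rnqLoopA.eq_def]
      simp [h]
  | succ n ih =>
      intro i inq qc res hn
      by_cases h : i < cs.length
      · conv_lhs => rw [rnqLoopA.eq_def]
        conv_rhs => rw [rnqLoopA.eq_def]
        rw [dif_pos h, dif_pos h]
        split_ifs
        all_goals try simp only [List.nil_append]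
        all_goals first
          | exact ih _ _ _ _ (by omega)
          | (rw [ih _ _ _ (res ++ [cs[i]]) (by omega), ih _ _ _ ([cs[i]]) (by omega)]; simp)
      · conv_lhs => rw [rnqLoopA.eq_def]
        conv_rhs => rw [rnqLoopA.eq_def]
        simp [h]

theorem main_base (cs : List Char) (i start : Nat) (inq : Bool) (qc : Option Char)
    (h : ¬ i < cs.length) (hil : i ≤ cs.length) :
    ((segsB cs i start inq qc).map renderSeg).flatten =
      (if inq then removeBSn (sliceN cs start i) else sliceN cs start i)
        ++ rnqLoopA cs i inq qc [] := by
  have hi : i = cs.length := by omega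
  subst hi
  conv_lhs => rw [segsB.eq_def]
  rw [dif_neg h]
  conv_rhs => rw [rnqLoopA.eq_def]
  rw [dif_neg h]
  simp [renderSeg, sliceN_len]

theorem main_lemma (cs : List Char) :
    ∀ n i start inq qc, cs.length - i ≤ n → start ≤ i → i ≤ cs.length →
      (inq = true → start < i ∧
        ∀ (hm : i < cs.length), cs[i-1]? = some '\\' → cs[i] ≠ 'n') →
      ((segsB cs i start inq qc).map renderSeg).flatten =
        (if inq then removeBSn (sliceN cs start i) else sliceN cs start i)
          ++ rnqLoopA cs i inq qc [] := by
  intro n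
  induction n with
  | zero =>
      intro i start inq qc hn hsi hil _
      exact main_base cs i start inq qc (by omega) hil
  | succ n ih =>
      intro i start inq qc hn hsi hil hinv
      by_cases h : i < cs.length
      · have hquote : (cs[i] = '"' ∨ cs[i] = '\'') → cs[i] ≠ 'n' := by
          rintro (hc | hc) <;> rw [hc] <;> decide
        have hsl : sliceN cs start (i+1) = sliceN cs start i ++ [cs[i]] :=
          sliceN_succ cs start i hsi h
        conv_lhs => rw [segsB.eq_def]
        conv_rhs => rw [rnqLoopA.eq_def]
        rw [dif_pos h, dif_pos h]
        by_cases hQ : (cs[i] = '"' ∨ cs[i] = '\'') ∧ (i = 0 ∨ cs[i-1]? ≠ some '\\')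
        · rw [if_pos hQ, if_pos hQ]
          have hrm : removeBSn (sliceN cs start i ++ [cs[i]]) =
              removeBSn (sliceN cs start i) ++ [cs[i]] := by
            rw [removeBSn_append _ [cs[i]] (by intro _ hh; simp at hh; exact hquote hQ.1 hh),
                removeBSn_single]
          by_cases hC : inq = true ∧ qc = some cs[i]
          · rw [if_pos hC, if_pos hC]
            obtain ⟨hC1, _⟩ := hC
            subst hC1
            have hIH := ih (i+1) (i+1) false none (by omega) (by omega) (by omega) (by simp)
            have hacc := rnqLoopA_acc cs cs.length (i+1) false none [cs[i]] (by omega)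
            simp [renderSeg, hIH, hacc, hsl, hrm, sliceN_self]
          · rw [if_neg hC, if_neg hC]
            by_cases hO : ¬ inq = true
            · rw [if_pos hO, if_pos hO]
              have hO' : inq = false := by revert hO; cases inq <;> simp
              subst hO'
              have hinv' : (true : Bool) = true → i < i + 1 ∧
                  ∀ (hm : i + 1 < cs.length), cs[i+1-1]? = some '\\' → cs[i+1] ≠ 'n' := by
                intro _
                refine ⟨by omega, ?_⟩
                intro hm hbs
                rw [show i + 1 - 1 = i from rfl, List.getElem?_eq_getElem h] at hbs
                have he := Option.some.inj hbs
                rcases hQ.1 with hc | hc <;> rw [he] at hc <;> exact absurd hc (by decide)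
              have hIH := ih (i+1) i true (some cs[i]) (by omega) (by omega) (by omega) hinv'
              have hacc := rnqLoopA_acc cs cs.length (i+1) true (some cs[i]) [cs[i]] (by omega)
              have hsl2 : sliceN cs i (i+1) = [cs[i]] := by
                rw [sliceN_succ cs i i (by omega) h, sliceN_self]; rfl
              simp [renderSeg, hIH, hacc, hsl2, removeBSn_single]
            · rw [if_neg hO, if_neg hO]
              have hO' : inq = true := by revert hO; cases inq <;> simp
              subst hO'
              have hinv' : (true : Bool) = true → start < i + 1 ∧
                  ∀ (hm : i + 1 < cs.length), cs[i+1-1]? = some '\\' → cs[i+1] ≠ 'n' := by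
                intro _
                refine ⟨by omega, ?_⟩
                intro hm hbs
                rw [show i + 1 - 1 = i from rfl, List.getElem?_eq_getElem h] at hbs
                have he := Option.some.inj hbs
                rcases hQ.1 with hc | hc <;> rw [he] at hc <;> exact absurd hc (by decide)
              have hIH := ih (i+1) start true qc (by omega) (by omega) (by omega) hinv'
              have hacc := rnqLoopA_acc cs cs.length (i+1) true qc [cs[i]] (by omega)
              simp [hIH, hacc, hsl, hrm]
        · rw [if_neg hQ, if_neg hQ]
          by_cases hS : inq = true ∧ cs[i] = '\\' ∧ i+1 < cs.length ∧ cs[i+1]? = some 'n'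
          · rw [if_pos hS]
            obtain ⟨hS1, hS2, hS3, hS4⟩ := hS
            subst hS1
            have hn1 : cs[i+1]'hS3 = 'n' := by
              rw [List.getElem?_eq_getElem hS3] at hS4
              exact Option.some.inj hS4
            conv_lhs => rw [segsB.eq_def]
            rw [dif_pos hS3]
            rw [if_neg (by
              rintro ⟨(hc | hc), -⟩ <;> rw [hn1] at hc <;> exact absurd hc (by decide))]
            have hinv' : (true : Bool) = true → start < i + 2 ∧
                ∀ (hm : i + 2 < cs.length), cs[i+2-1]? = some '\\' → cs[i+2] ≠ 'n' := by
              intro _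
              refine ⟨by omega, ?_⟩
              intro hm hbs
              rw [show i + 2 - 1 = i + 1 from rfl, List.getElem?_eq_getElem hS3] at hbs
              have he := Option.some.inj hbs
              rw [hn1] at he
              exact absurd he (by decide)
            have hIH := ih (i+2) start true qc (by omega) (by omega) (by omega) hinv'
            have hsl2 : sliceN cs start (i+2) = sliceN cs start i ++ ['\\', 'n'] := by
              rw [sliceN_succ cs start (i+1) (by omega) hS3, hsl, hn1, hS2, List.append_assoc]
              rfl
            have hrm2 : removeBSn (sliceN cs start i ++ ['\\', 'n']) =
                removeBSn (sliceN cs start i) := by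
              rw [removeBSn_append _ ['\\', 'n'] (by intro _ hh; simp at hh)]
              simp [show removeBSn ['\\', 'n'] = [] from rfl]
            simp [hIH, hsl2, hrm2]
          · rw [if_neg hS]
            cases inq with
            | false =>
                have hIH := ih (i+1) start false qc (by omega) (by omega) (by omega) (by simp)
                have hacc := rnqLoopA_acc cs cs.length (i+1) false qc [cs[i]] (by omega)
                simp [hIH, hacc, hsl]
            | true =>
                obtain ⟨hlt, hprev⟩ := hinv rfl
                have hinv' : (true : Bool) = true → start < i + 1 ∧
                    ∀ (hm : i + 1 < cs.length), cs[i+1-1]? = some '\\' → cs[i+1] ≠ 'n' := by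
                  intro _
                  refine ⟨by omega, ?_⟩
                  intro hm hbs
                  rw [show i + 1 - 1 = i from rfl, List.getElem?_eq_getElem h] at hbs
                  have he := Option.some.inj hbs
                  intro hne
                  have hn2 : cs[i+1]? = some 'n' := by
                    rw [List.getElem?_eq_getElem hm, hne]
                  exact hS ⟨rfl, he, hm, hn2⟩
                have hIH := ih (i+1) start true qc (by omega) (by omega) (by omega) hinv'
                have hacc := rnqLoopA_acc cs cs.length (i+1) true qc [cs[i]] (by omega)
                have hrm : removeBSn (sliceN cs start i ++ [cs[i]]) =
                    removeBSn (sliceN cs start i) ++ [cs[i]] := by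
                  rw [removeBSn_append _ [cs[i]] ?_, removeBSn_single]
                  intro hl hh
                  simp at hh
                  rw [sliceN_getLast? cs start i hlt hil] at hl
                  exact hprev h hl hh
                simp [hIH, hacc, hsl, hrm]
      · exact main_base cs i start inq qc h hil

-- ===== VERDICT (by name: the statement is the Claim_ definition above) =====
theorem remove_newlines_in_quotes_spec : Claim_equal_remove_newlines_in_quotes := by
  intro text _
  unfold Spec_remove_newlines_in_quotes remove_newlines_in_quotes remove_newlines_in_quotes_alt
  have := main_lemma text.toList text.toList.length 0 0 false none (by omega) (by omega) (by omega) (by simp)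
  simp only [if_neg (by simp : ¬ (false = true)), sliceN_self, List.nil_append] at this
  rw [this]
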